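-- pv_equiv track=rewrite | github.com/JeffShun/RetinaNet3D | train/custom/utils/generate_dataset.py | find_outer_bounding_box3D
-- ===== SOURCE A (Python) =====
-- def find_outer_bounding_box3D(boxes):
--     if not boxes:
--         return None
--
--     x_min = boxes[0][0]
--     y_min = boxes[0][1]
--     x_max = boxes[0][2]
--     y_max = boxes[0][3]
--     z_min =  boxes[0][4]
--     z_max =  boxes[0][4]
--
--     for box in boxes:
--         x1, y1, x2, y2, z = box
--         if x1 < x_min:
--             x_min = x1
--         if y1 < y_min:
--             y_min = y1
--         if x2 > x_max:
--             x_max = x2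
--         if y2 > y_max:
--             y_max = y2
--         if z < z_min:
--             z_min = z
--         if z > z_max:
--             z_max = z
--
--     return [z_min, y_min, x_min, z_max, y_max, x_max]
-- ===== SOURCE B (Python) =====
-- def find_outer_bounding_box3D(boxes):
--     if not boxes:
--         return None
--     xs1, ys1, xs2, ys2, zs = [], [], [], [], []
--     for box in boxes:
--         x1, y1, x2, y2, z = box
--         xs1.append(x1)
--         ys1.append(y1)
--         xs2.append(x2)
--         ys2.append(y2)
--         zs.append(z)
--     return [min(zs), min(ys1), min(xs1), max(zs), max(ys2), max(xs2)]
-- ===== Notes on version B (the rewrite author's own statement) =====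
-- stated objective: simpler
-- what changed: Replaces the six running-extremum variables and if-chains with a column decomposition: collect the five coordinate columns, then take min/max of each column with the builtins.
import Mathlib
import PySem

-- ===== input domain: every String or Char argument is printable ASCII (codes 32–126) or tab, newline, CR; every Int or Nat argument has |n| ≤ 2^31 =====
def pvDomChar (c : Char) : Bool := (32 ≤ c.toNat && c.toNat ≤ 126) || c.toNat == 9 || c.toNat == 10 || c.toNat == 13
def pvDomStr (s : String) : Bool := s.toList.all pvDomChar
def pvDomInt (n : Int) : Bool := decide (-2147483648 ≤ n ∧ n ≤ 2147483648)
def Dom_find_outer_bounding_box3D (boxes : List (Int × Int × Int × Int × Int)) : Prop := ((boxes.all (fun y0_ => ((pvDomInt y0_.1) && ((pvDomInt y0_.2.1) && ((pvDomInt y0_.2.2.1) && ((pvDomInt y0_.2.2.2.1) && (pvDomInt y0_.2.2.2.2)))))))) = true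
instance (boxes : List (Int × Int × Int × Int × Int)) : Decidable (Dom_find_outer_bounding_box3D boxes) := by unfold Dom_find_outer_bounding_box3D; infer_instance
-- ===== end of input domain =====

-- B replaces A's six running-extremum variables and if-chains with a column decomposition
-- (project the five coordinate columns, then take the min/max of each column): simpler.


-- ===== PORT A =====
-- the body of A's for-loop: six running extrema updated with if-chains
def pvStepA (s : Int × Int × Int × Int × Int × Int) (box : Int × Int × Int × Int × Int) :
    Int × Int × Int × Int × Int × Int :=
  let (xm, ym, xM, yM, zm, zM) := s
  let (x1, y1, x2, y2, z) := box
  let xm := if x1 < xm then x1 else xm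
  let ym := if y1 < ym then y1 else ym
  let xM := if x2 > xM then x2 else xM
  let yM := if y2 > yM then y2 else yM
  let zm := if z < zm then z else zm
  let zM := if z > zM then z else zM
  (xm, ym, xM, yM, zm, zM)

def find_outer_bounding_box3D (boxes : List (Int × Int × Int × Int × Int)) : Option (List Int) :=
  match boxes with
  | [] => none
  | b0 :: _ =>
    let init : Int × Int × Int × Int × Int × Int :=
      (b0.1, b0.2.1, b0.2.2.1, b0.2.2.2.1, b0.2.2.2.2, b0.2.2.2.2)
    let r := boxes.foldl pvStepA init
    some [r.2.2.2.2.1, r.2.1, r.1, r.2.2.2.2.2, r.2.2.2.1, r.2.2.1]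

-- ===== PORT B =====
-- Python's builtin min/max over a nonempty list (the [] case is unreachable in B)
def pvColMin : List Int → Int
  | [] => 0
  | x :: xs => xs.foldl min x

def pvColMax : List Int → Int
  | [] => 0
  | x :: xs => xs.foldl max x

def find_outer_bounding_box3D_alt (boxes : List (Int × Int × Int × Int × Int)) : Option (List Int) :=
  match boxes with
  | [] => none
  | _ =>
    let xs1 := boxes.map (·.1)
    let ys1 := boxes.map (·.2.1)
    let xs2 := boxes.map (·.2.2.1)
    let ys2 := boxes.map (·.2.2.2.1)
    let zs  := boxes.map (·.2.2.2.2)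
    some [pvColMin zs, pvColMin ys1, pvColMin xs1, pvColMax zs, pvColMax ys2, pvColMax xs2]

-- ===== PRECONDITION & SPEC =====
def Spec_find_outer_bounding_box3D (boxes : List (Int × Int × Int × Int × Int)) (out : Option (List Int)) : Prop := out = find_outer_bounding_box3D_alt boxes
instance (boxes : List (Int × Int × Int × Int × Int)) (out : Option (List Int)) : Decidable (Spec_find_outer_bounding_box3D boxes out) := by unfold Spec_find_outer_bounding_box3D; infer_instance

-- ===== CLAIM (what is proved, stated in full; the proofs are below) =====
def Claim_equal_find_outer_bounding_box3D : Prop := ∀ (boxes : List (Int × Int × Int × Int × Int)), Dom_find_outer_bounding_box3D boxes → Spec_find_outer_bounding_box3D boxes (find_outer_bounding_box3D boxes)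

-- ===== LEMMAS AND PROOFS =====

theorem pvIfMin (a x : Int) : (if x < a then x else a) = min a x := by
  split_ifs <;> omega

theorem pvIfMax (a x : Int) : (if x > a then x else a) = max a x := by
  split_ifs <;> omega

-- A's combined fold computes, componentwise, the fold of min/max over each column.
theorem pvFoldA_eq (l : List (Int × Int × Int × Int × Int))
    (xm ym xM yM zm zM : Int) :
    l.foldl pvStepA (xm, ym, xM, yM, zm, zM) =
      ( l.foldl (fun a b => min a b.1) xm,
        l.foldl (fun a b => min a b.2.1) ym,
        l.foldl (fun a b => max a b.2.2.1) xM,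
        l.foldl (fun a b => max a b.2.2.2.1) yM,
        l.foldl (fun a b => min a b.2.2.2.2) zm,
        l.foldl (fun a b => max a b.2.2.2.2) zM ) := by
  induction l generalizing xm ym xM yM zm zM with
  | nil => rfl
  | cons b l ih =>
    simp only [List.foldl_cons, pvStepA, pvIfMin, pvIfMax, ih]

-- ===== VERDICT (by name: the statement is the Claim_ definition above) =====
theorem find_outer_bounding_box3D_spec : Claim_equal_find_outer_bounding_box3D := by
  intro boxes _
  unfold Spec_find_outer_bounding_box3D
  match boxes with
  | [] => rfl
  | b :: bs =>
    simp [find_outer_bounding_box3D, find_outer_bounding_box3D_alt,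
      pvStepA, pvFoldA_eq, pvColMin, pvColMax, List.foldl_map]
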